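-- pv_equiv track=rewrite | github.com/zhenfelix/OnlineJudgeCodings | LeetCode/力扣杯/LCP 08. 剧情触发时间.py | getTriggerTime
-- ===== SOURCE A (Python) =====
-- from typing import List
--
-- import bisect
--
-- def getTriggerTime(increase: List[List[int]], requirements: List[List[int]]) -> List[int]:
--     c, r, h = 0, 0, 0
--     for i, inc in enumerate(increase):
--         c, r, h = inc[0]+c, inc[1]+r, inc[2]+h
--         increase[i][0], increase[i][1], increase[i][2] = c, r, h
--     increase = [[0,0,0]] + increase
--     cs = list(map(lambda x:x[0], increase))
--     rs = list(map(lambda x:x[1], increase))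
--     hs = list(map(lambda x:x[2], increase))
--     ans = []
--     for c,r,h in requirements:
--         d = max(bisect.bisect_left(cs,c),bisect.bisect_left(rs,r),bisect.bisect_left(hs,h))
--         if d >= len(increase):
--             d = -1
--         ans.append(d)
--     return ans
-- ===== SOURCE B (Python) =====
-- from typing import List
--
--
-- def lower(a: List[int], x: int) -> int:
--     # leftmost insertion point for x in a, by recursion on slices
--     if not a:
--         return 0
--     m = len(a) // 2
--     if a[m] < x:
--         return m + 1 + lower(a[m + 1:], x)
--     return lower(a[:m], x)
--
--
-- def getTriggerTime(increase: List[List[int]], requirements: List[List[int]]) -> List[int]: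
--     c, r, h = 0, 0, 0
--     cs, rs, hs = [0], [0], [0]
--     for row in increase:
--         c, r, h = c + row[0], r + row[1], h + row[2]
--         cs.append(c)
--         rs.append(r)
--         hs.append(h)
--     n = len(cs)
--     ans = []
--     for req in requirements:
--         rc, rr, rh = req
--         d = max(lower(cs, rc), lower(rs, rr), lower(hs, rh))
--         ans.append(d if d < n else -1)
--     return ans
-- ===== Notes on version B (the rewrite author's own statement) =====
-- stated objective: alternative
-- what changed: B builds the three cumulative columns in one pass with the baseline row included (no in-place write-back, no [0,0,0] prepend, no three map passes) and replaces the bisect library's iterative lo/hi loop by a recursive slice-based lower bound; unlike A, B does not mutate the increase argument.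
import Mathlib
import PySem

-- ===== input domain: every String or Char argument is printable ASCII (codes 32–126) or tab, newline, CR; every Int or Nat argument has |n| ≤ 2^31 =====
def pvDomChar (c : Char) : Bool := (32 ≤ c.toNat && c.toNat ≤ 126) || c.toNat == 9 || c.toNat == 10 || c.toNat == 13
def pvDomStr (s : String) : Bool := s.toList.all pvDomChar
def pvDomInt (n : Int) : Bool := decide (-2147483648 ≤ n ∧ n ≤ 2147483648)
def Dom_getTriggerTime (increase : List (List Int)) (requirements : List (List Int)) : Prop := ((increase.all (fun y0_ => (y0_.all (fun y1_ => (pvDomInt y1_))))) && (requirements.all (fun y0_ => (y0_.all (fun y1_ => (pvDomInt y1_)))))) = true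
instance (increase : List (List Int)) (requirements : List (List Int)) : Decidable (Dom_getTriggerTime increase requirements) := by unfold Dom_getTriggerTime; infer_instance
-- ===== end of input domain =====

-- B builds the three cumulative columns directly (baseline row included, no prepend, no map
-- passes) and replaces the bisect library's iterative lo/hi loop by a recursive slice-based
-- lower bound (objective: alternative decomposition, same cost).  NOTE: Python A mutates
-- `increase` in place (writes the prefix sums back into its rows); Python B does not mutate
-- anything; the claim proved here is about the RETURN value only.

-- ===== PORT A =====
-- shared tiny helper: Python's xs[i] for an in-range index (exact under Pre_, which keeps indices in range)
def pvAt (row : List Int) (i : Int) : Int := (PySem.List.pyGet? row i).getD 0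

-- A's first loop: prefix sums written back into the rows
def accRowsA : Int → Int → Int → List (List Int) → List (List Int)
  | _, _, _, [] => []
  | c, r, h, row :: rest =>
      let c' := pvAt row 0 + c
      let r' := pvAt row 1 + r
      let h' := pvAt row 2 + h
      ([c', r', h'] ++ row.drop 3) :: accRowsA c' r' h' rest

-- Python's bisect.bisect_left loop, fuel = hi - lo bound
def bisectGo (a : List Int) (x : Int) : Nat → Nat → Nat → Nat
  | 0, lo, _ => lo
  | fuel + 1, lo, hi =>
      if lo < hi then
        let mid := (lo + hi) / 2
        if pvAt a (mid : Int) < x then bisectGo a x fuel (mid + 1) hi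
        else bisectGo a x fuel lo mid
      else lo

def bisectLeft (a : List Int) (x : Int) : Nat := bisectGo a x a.length 0 a.length

def getTriggerTime (increase : List (List Int)) (requirements : List (List Int)) : List Int :=
  let inc2 := [([0, 0, 0] : List Int)] ++ accRowsA 0 0 0 increase
  let cs := inc2.map (fun x => pvAt x 0)
  let rs := inc2.map (fun x => pvAt x 1)
  let hs := inc2.map (fun x => pvAt x 2)
  requirements.foldl (fun ans req =>
    let c := pvAt req 0
    let r := pvAt req 1
    let h := pvAt req 2
    let d := max (max (bisectLeft cs c) (bisectLeft rs r)) (bisectLeft hs h)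
    ans ++ [if inc2.length ≤ d then (-1 : Int) else (d : Int)]) []

-- ===== PORT B =====
-- B's lower: leftmost insertion point by recursion on slices (a[m+1:] / a[:m])
def lowerRec (a : List Int) (x : Int) : Nat :=
  if h : a = [] then 0
  else
    let m := a.length / 2
    if pvAt a (m : Int) < x then
      m + 1 + lowerRec (PySem.List.slice a (some ((m + 1 : Nat) : Int)) none) x
    else
      lowerRec (PySem.List.slice a none (some ((m : Nat) : Int))) x
termination_by a.length
decreasing_by
  · have h0 : 0 < a.length := List.length_pos_of_ne_nil h
    rw [PySem.List.slice_from_natCast]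
    simp only [List.length_drop]
    omega
  · have h0 : 0 < a.length := List.length_pos_of_ne_nil h
    rw [PySem.List.slice_to_natCast]
    simp only [List.length_take]
    omega

-- B's column-building loop: the three cumulative columns, one pass, no mutation
def colsB : Int → Int → Int → List (List Int) → List Int × List Int × List Int
  | _, _, _, [] => ([], [], [])
  | c, r, h, row :: rest =>
      let c' := c + pvAt row 0
      let r' := r + pvAt row 1
      let h' := h + pvAt row 2
      let t := colsB c' r' h' rest
      (c' :: t.1, r' :: t.2.1, h' :: t.2.2)

def getTriggerTime_alt (increase : List (List Int)) (requirements : List (List Int)) : List Int :=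
  let t := colsB 0 0 0 increase
  let cs : List Int := 0 :: t.1
  let rs : List Int := 0 :: t.2.1
  let hs : List Int := 0 :: t.2.2
  let n := cs.length
  requirements.map (fun req =>
    let rc := pvAt req 0
    let rr := pvAt req 1
    let rh := pvAt req 2
    let d := max (max (lowerRec cs rc) (lowerRec rs rr)) (lowerRec hs rh)
    if d < n then (d : Int) else -1)

-- ===== PRECONDITION & SPEC =====
-- Pre_ excludes only the inputs on which Python A raises: an increase row shorter than 3
-- (IndexError on inc[2] / the write-back) or a requirements row whose length is not exactly 3
-- (ValueError on unpacking 'for c,r,h in requirements').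
def Pre_getTriggerTime (increase : List (List Int)) (requirements : List (List Int)) : Prop :=
  (∀ row ∈ increase, 3 ≤ row.length) ∧ (∀ row ∈ requirements, row.length = 3)

instance (increase : List (List Int)) (requirements : List (List Int)) : Decidable (Pre_getTriggerTime increase requirements) := by unfold Pre_getTriggerTime; infer_instance

def pvWitness_getTriggerTime : List (List Int) × List (List Int) :=
  ([[2, 8, 4], [2, 5, 0], [10, 9, 8]], [[2, 11, 3], [15, 10, 7], [9, 17, 12], [8, 1, 14]])

def Spec_getTriggerTime (increase : List (List Int)) (requirements : List (List Int)) (out : List Int) : Prop := out = getTriggerTime_alt increase requirements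
instance (increase : List (List Int)) (requirements : List (List Int)) (out : List Int) : Decidable (Spec_getTriggerTime increase requirements out) := by unfold Spec_getTriggerTime; infer_instance

-- ===== CLAIM (what is proved, stated in full; the proofs are below) =====
def Claim_equal_getTriggerTime : Prop := ∀ (increase : List (List Int)) (requirements : List (List Int)), Dom_getTriggerTime increase requirements → Pre_getTriggerTime increase requirements → Spec_getTriggerTime increase requirements (getTriggerTime increase requirements)

-- ===== LEMMAS AND PROOFS =====

-- pvAt on small numeral indices equals List.getD
theorem pvAt_zero (row : List Int) : pvAt row 0 = row.getD 0 0 := by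
  cases row <;> simp [pvAt, PySem.List.pyGet?, PySem.List.pyIdx?, List.getD]

theorem pvAt_one (row : List Int) : pvAt row 1 = row.getD 1 0 := by
  match row with
  | [] => simp [pvAt, PySem.List.pyGet?, PySem.List.pyIdx?, List.getD]
  | [a] => simp [pvAt, PySem.List.pyGet?, PySem.List.pyIdx?, List.getD]
  | a :: b :: t => simp [pvAt, PySem.List.pyGet?, PySem.List.pyIdx?, List.getD]

theorem pvAt_two (row : List Int) : pvAt row 2 = row.getD 2 0 := by
  match row with
  | [] => simp [pvAt, PySem.List.pyGet?, PySem.List.pyIdx?, List.getD]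
  | [a] => simp [pvAt, PySem.List.pyGet?, PySem.List.pyIdx?, List.getD]
  | [a, b] => simp [pvAt, PySem.List.pyGet?, PySem.List.pyIdx?, List.getD]
  | a :: b :: c :: t =>
      have h2 : (2:Int) ≤ (t.length:Int) + 1 + 1 := by omega
      simp [pvAt, PySem.List.pyGet?, PySem.List.pyIdx?, List.getD, h2]

theorem pvAt_natCast (xs : List Int) (n : Nat) (h : n < xs.length) :
    pvAt xs (n : Int) = xs[n] := by
  simp [pvAt, h]

-- the three coordinate projections of A's accumulated rows are B's three columns
theorem accRowsA_cols (rows : List (List Int)) : ∀ c r h : Int,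
    (accRowsA c r h rows).map (fun x => pvAt x 0) = (colsB c r h rows).1 ∧
    (accRowsA c r h rows).map (fun x => pvAt x 1) = (colsB c r h rows).2.1 ∧
    (accRowsA c r h rows).map (fun x => pvAt x 2) = (colsB c r h rows).2.2 := by
  induction rows with
  | nil => intro c r h; simp [accRowsA, colsB]
  | cons row rest ih =>
      intro c r h
      obtain ⟨h1, h2, h3⟩ := ih (pvAt row 0 + c) (pvAt row 1 + r) (pvAt row 2 + h)
      have hh0 : pvAt ([pvAt row 0 + c, pvAt row 1 + r, pvAt row 2 + h] ++ row.drop 3) 0 = pvAt row 0 + c := by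
        rw [pvAt_zero]; simp [List.getD]
      have hh1 : pvAt ([pvAt row 0 + c, pvAt row 1 + r, pvAt row 2 + h] ++ row.drop 3) 1 = pvAt row 1 + r := by
        rw [pvAt_one]; simp [List.getD]
      have hh2 : pvAt ([pvAt row 0 + c, pvAt row 1 + r, pvAt row 2 + h] ++ row.drop 3) 2 = pvAt row 2 + h := by
        rw [pvAt_two]; simp [List.getD]
      have ec : c + pvAt row 0 = pvAt row 0 + c := by ring
      have er : r + pvAt row 1 = pvAt row 1 + r := by ring
      have eh : h + pvAt row 2 = pvAt row 2 + h := by ring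
      refine ⟨?_, ?_, ?_⟩ <;>
        · simp only [accRowsA, colsB, List.map_cons, ec, er, eh]
          simp only [hh0, hh1, hh2, h1, h2, h3]

-- the iterative bisect loop on a window equals the recursive slice-based lower bound
theorem bisectGo_eq_lowerRec (a : List Int) (x : Int) :
    ∀ fuel lo hi, lo ≤ hi → hi ≤ a.length → hi - lo ≤ fuel →
    bisectGo a x fuel lo hi = lo + lowerRec ((a.drop lo).take (hi - lo)) x := by
  intro fuel
  induction fuel with
  | zero =>
      intro lo hi h1 h2 h3
      have : lo = hi := by omega
      subst this
      rw [lowerRec]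
      simp [bisectGo]
  | succ fuel ih =>
      intro lo hi h1 h2 h3
      by_cases hlh : lo < hi
      · have hslen : ((a.drop lo).take (hi - lo)).length = hi - lo := by
          simp only [List.length_take, List.length_drop]; omega
        have hsne : ¬ ((a.drop lo).take (hi - lo)) = [] := by
          intro he; rw [he] at hslen; simp at hslen; omega
        have hmlen : ((a.drop lo).take (hi - lo)).length / 2 = (lo + hi) / 2 - lo := by omega
        have hmidlt : (lo + hi) / 2 < a.length := by omega
        have hsm : pvAt ((a.drop lo).take (hi - lo)) ((((a.drop lo).take (hi - lo)).length / 2 : Nat) : Int)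
            = a[(lo + hi) / 2]'hmidlt := by
          rw [pvAt_natCast _ _ (by omega)]
          rw [List.getElem_take, List.getElem_drop]
          congr 1
          omega
        simp only [bisectGo, if_pos hlh]
        rw [pvAt_natCast a ((lo + hi) / 2) hmidlt]
        rw [lowerRec]
        rw [dif_neg hsne]
        simp only [hsm]
        by_cases hcmp : a[(lo + hi) / 2]'hmidlt < x
        · rw [if_pos hcmp, if_pos hcmp]
          rw [ih ((lo + hi) / 2 + 1) hi (by omega) h2 (by omega)]
          have hdrop : PySem.List.slice ((a.drop lo).take (hi - lo))
              (some ((((a.drop lo).take (hi - lo)).length / 2 + 1 : Nat) : Int)) none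
              = (a.drop ((lo + hi) / 2 + 1)).take (hi - ((lo + hi) / 2 + 1)) := by
            rw [PySem.List.slice_from_natCast]
            rw [List.drop_take, List.drop_drop]
            congr 1
            · omega
            · congr 1; omega
          rw [hdrop]
          omega
        · rw [if_neg hcmp, if_neg hcmp]
          rw [ih lo ((lo + hi) / 2) (by omega) (by omega) (by omega)]
          have htake : PySem.List.slice ((a.drop lo).take (hi - lo))
              (none : Option Int) (some ((((a.drop lo).take (hi - lo)).length / 2 : Nat) : Int))
              = (a.drop lo).take ((lo + hi) / 2 - lo) := by
            rw [PySem.List.slice_to_natCast]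
            rw [List.take_take]
            congr 1
            omega
          rw [htake]
      · have : lo = hi := by omega
        subst this
        rw [lowerRec]
        simp [bisectGo]

theorem bisectLeft_eq_lowerRec (a : List Int) (x : Int) : bisectLeft a x = lowerRec a x := by
  have := bisectGo_eq_lowerRec a x a.length 0 a.length (by omega) (le_refl _) (by omega)
  simpa [bisectLeft] using this

-- A's foldl-with-append over requirements is a map
theorem foldl_append_map (f : List Int → Int) (reqs : List (List Int)) : ∀ acc : List Int,
    reqs.foldl (fun ans req => ans ++ [f req]) acc = acc ++ reqs.map f := by
  induction reqs with
  | nil => intro acc; simp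
  | cons req rest ih => intro acc; simp [ih]

-- ===== VERDICT (by name: the statement is the Claim_ definition above) =====
theorem getTriggerTime_spec : Claim_equal_getTriggerTime := by
  intro increase requirements _ _
  unfold Spec_getTriggerTime getTriggerTime getTriggerTime_alt
  obtain ⟨hm1, hm2, hm3⟩ := accRowsA_cols increase 0 0 0
  have e1 : (([([0,0,0] : List Int)] ++ accRowsA 0 0 0 increase).map (fun x => pvAt x 0)) = 0 :: (colsB 0 0 0 increase).1 := by
    simp only [List.cons_append, List.nil_append, List.map_cons, hm1]
    simp [pvAt_zero, List.getD]
  have e2 : (([([0,0,0] : List Int)] ++ accRowsA 0 0 0 increase).map (fun x => pvAt x 1)) = 0 :: (colsB 0 0 0 increase).2.1 := by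
    simp only [List.cons_append, List.nil_append, List.map_cons, hm2]
    simp [pvAt_one, List.getD]
  have e3 : (([([0,0,0] : List Int)] ++ accRowsA 0 0 0 increase).map (fun x => pvAt x 2)) = 0 :: (colsB 0 0 0 increase).2.2 := by
    simp only [List.cons_append, List.nil_append, List.map_cons, hm3]
    simp [pvAt_two, List.getD]
  have elen : ([([0,0,0] : List Int)] ++ accRowsA 0 0 0 increase).length = (0 :: (colsB 0 0 0 increase).1).length := by
    have h1 := congrArg List.length e1
    simpa using h1
  rw [foldl_append_map]
  simp only [List.nil_append]
  apply List.map_congr_left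
  intro req _
  rw [e1, e2, e3, elen]
  rw [bisectLeft_eq_lowerRec, bisectLeft_eq_lowerRec, bisectLeft_eq_lowerRec]
  split_ifs with ha hb hb <;> first | rfl | omega
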